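-- pv_equiv track=rewrite | github.com/YanisFallet/sh-tk-pipeline | core/utils.py | split_text_m_h_t
-- ===== SOURCE A (Python) =====
-- def split_text_m_h_t(text):
--     i = 0
--     result = []
--     substr = ""
--     while i < len(text):
--         if text[i] == "#" or text[i] == "@":
--             if substr:
--                 result.append(substr)
--             substr = ""
--             while i < len(text) and text[i] != " ":
--                 substr += text[i]
--                 i += 1
--             result.append(substr)
--             substr = ""
--         else:
--             substr += text[i]
--         i += 1
--     if substr:
--         result.append(substr)
--     return result
-- ===== SOURCE B (Python) =====
-- def split_text_m_h_t(text):
--     result = []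
--     rest = text
--     while rest:
--         h = rest.find('#')
--         a = rest.find('@')
--         if h == -1 and a == -1:
--             result.append(rest)
--             break
--         j = min(p for p in (h, a) if p != -1)
--         if j > 0:
--             result.append(rest[:j])
--         k = rest.find(' ', j)
--         if k == -1:
--             result.append(rest[j:])
--             break
--         result.append(rest[j:k])
--         rest = rest[k + 1:]
--     return result
-- ===== Notes on version B (the rewrite author's own statement) =====
-- stated objective: faster
-- what changed: Replaced A's char-by-char scan that builds an accumulator string one character at a time by a find/slice loop that jumps directly from one marker to the next, emitting whole slices for the plain segment and for the marker token.
import Mathlib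
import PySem

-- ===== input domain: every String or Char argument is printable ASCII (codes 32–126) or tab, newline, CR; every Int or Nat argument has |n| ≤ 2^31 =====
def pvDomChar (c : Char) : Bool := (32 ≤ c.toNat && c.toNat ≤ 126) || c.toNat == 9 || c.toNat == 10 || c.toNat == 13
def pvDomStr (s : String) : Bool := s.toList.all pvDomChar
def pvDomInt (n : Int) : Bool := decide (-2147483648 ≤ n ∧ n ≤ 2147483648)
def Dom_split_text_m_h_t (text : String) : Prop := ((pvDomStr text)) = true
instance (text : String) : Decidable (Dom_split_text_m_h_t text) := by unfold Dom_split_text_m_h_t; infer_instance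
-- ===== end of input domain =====

-- B replaces A's char-by-char accumulator scan with a find/slice loop that jumps
-- from marker to marker, avoiding per-character string concatenation (measured faster).

-- ===== PORT A =====
-- inner while: 'while i < len(text) and text[i] != " ": substr += text[i]; i += 1'
-- returns (the characters consumed, the remaining suffix)
def pvInnerA : List Char → List Char × List Char
  | [] => ([], [])
  | c :: cs =>
    if c ≠ ' ' then ((c :: (pvInnerA cs).1), (pvInnerA cs).2)
    else ([], c :: cs)

theorem pvInnerA_snd_length : ∀ l : List Char, (pvInnerA l).2.length ≤ l.length := by
  intro l
  induction l with
  | nil => simp [pvInnerA]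
  | cons c cs ih =>
    by_cases h : c = ' ' <;> simp [pvInnerA, h] <;> omega

-- outer while loop; state = (remaining suffix, substr, result)
def pvLoopA (l : List Char) (substr : List Char) (result : List String) : List String :=
  match l with
  | [] => if substr = [] then result else result ++ [String.ofList substr]
  | c :: cs =>
    if h : c = '#' ∨ c = '@' then
      let result1 := if substr = [] then result else result ++ [String.ofList substr]
      let tr := pvInnerA (c :: cs)
      pvLoopA tr.2.tail [] (result1 ++ [String.ofList tr.1])
    else
      pvLoopA cs (substr ++ [c]) result
termination_by l.length
decreasing_by
  · have hc : c ≠ ' ' := by rcases h with h | h <;> simp [h]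
    have h1 : (pvInnerA (c :: cs)).2 = (pvInnerA cs).2 := by simp [pvInnerA, hc]
    have h2 := pvInnerA_snd_length cs
    simp only [h1, List.length_cons]
    have h3 : (pvInnerA cs).2.tail.length = (pvInnerA cs).2.length - 1 := List.length_tail
    omega
  · simp

def split_text_m_h_t (text : String) : List String := pvLoopA text.toList [] []

-- ===== PORT B =====
-- Source B's loop: find the next '#'/'@', emit the slice before it, find the next ' ',
-- emit the marker token slice, continue after the space.
-- termination fact for pvLoopB, cited by name in its decreasing_by
theorem pvLoopB_dec (rest : List Char) (hrest : ¬rest = [])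
    (hna : ¬(PySem.Chars.find rest ['#'] = -1 ∧ PySem.Chars.find rest ['@'] = -1))
    (hk : ¬ PySem.Chars.findFrom rest [' ']
        (if PySem.Chars.find rest ['#'] = -1 then PySem.Chars.find rest ['@']
         else if PySem.Chars.find rest ['@'] = -1 then PySem.Chars.find rest ['#']
         else min (PySem.Chars.find rest ['#']) (PySem.Chars.find rest ['@'])) none = -1) :
    (PySem.Chars.slice rest
       (some (PySem.Chars.findFrom rest [' ']
         (if PySem.Chars.find rest ['#'] = -1 then PySem.Chars.find rest ['@']
          else if PySem.Chars.find rest ['@'] = -1 then PySem.Chars.find rest ['#']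
          else min (PySem.Chars.find rest ['#']) (PySem.Chars.find rest ['@'])) none + 1))
       none).length < rest.length := by
  have h1 := PySem.Chars.neg_one_le_find rest ['#']
  have h2 := PySem.Chars.neg_one_le_find rest ['@']
  have h1l := PySem.Chars.find_le_length rest ['#']
  have h2l := PySem.Chars.find_le_length rest ['@']
  rw [not_and_or] at hna
  set j : Int := (if PySem.Chars.find rest ['#'] = -1 then PySem.Chars.find rest ['@']
          else if PySem.Chars.find rest ['@'] = -1 then PySem.Chars.find rest ['#']
          else min (PySem.Chars.find rest ['#']) (PySem.Chars.find rest ['@'])) with hjdef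
  have hj0 : 0 ≤ j := by rw [hjdef]; split_ifs <;> simp_all <;> omega
  have hjl : j ≤ rest.length := by rw [hjdef]; split_ifs <;> omega
  have hft := PySem.Chars.findFrom_natCast rest [' '] j.toNat (by omega)
  rw [Int.toNat_of_nonneg hj0] at hft
  rw [hft] at hk ⊢
  have h3 := PySem.Chars.neg_one_le_find (List.drop j.toNat rest) [' ']
  split_ifs at hk ⊢ with hf
  · simp at hk
  · have hk0 : 0 ≤ j + PySem.Chars.find (List.drop j.toNat rest) [' '] + 1 := by omega
    simp only [PySem.Chars.slice_eq_listSlice]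
    rw [PySem.List.slice_from rest hk0]
    have hlen : rest.length > 0 := List.length_pos_iff.mpr hrest
    have : (j + PySem.Chars.find (List.drop j.toNat rest) [' '] + 1).toNat ≥ 1 := by omega
    simp only [List.length_drop]
    omega

def pvLoopB (rest : List Char) (result : List String) : List String :=
  if rest = [] then result
  else
    let h := PySem.Chars.find rest ['#']
    let a := PySem.Chars.find rest ['@']
    if h = -1 ∧ a = -1 then result ++ [String.ofList rest]
    else
      let j := if h = -1 then a else if a = -1 then h else min h a
      let result1 :=
        if 0 < j then result ++ [String.ofList (PySem.Chars.slice rest none (some j))] else result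
      let k := PySem.Chars.findFrom rest [' '] j none
      if k = -1 then result1 ++ [String.ofList (PySem.Chars.slice rest (some j) none)]
      else
        pvLoopB (PySem.Chars.slice rest (some (k + 1)) none)
          (result1 ++ [String.ofList (PySem.Chars.slice rest (some j) (some k))])
termination_by rest.length
decreasing_by
  exact pvLoopB_dec rest ‹_› ‹_› ‹_›

def split_text_m_h_t_alt (text : String) : List String := pvLoopB text.toList []

-- ===== PRECONDITION & SPEC =====
def Spec_split_text_m_h_t (text : String) (out : List String) : Prop := out = split_text_m_h_t_alt text
instance (text : String) (out : List String) : Decidable (Spec_split_text_m_h_t text out) := by unfold Spec_split_text_m_h_t; infer_instance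

-- ===== CLAIM (what is proved, stated in full; the proofs are below) =====
def Claim_equal_split_text_m_h_t : Prop := ∀ (text : String), Dom_split_text_m_h_t text → Spec_split_text_m_h_t text (split_text_m_h_t text)

-- ===== LEMMAS AND PROOFS =====

theorem pv_singleton_prefix (c : Char) (xs : List Char) : [c] <+: xs ↔ xs.head? = some c := by
  cases xs with
  | nil => simp
  | cons y ys => simp [List.cons_prefix_cons, eq_comm]

theorem pv_charAt (c : Char) (l : List Char) (n : Nat) : [c] <+: l.drop n ↔ l[n]? = some c := by
  rw [pv_singleton_prefix, List.head?_drop]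

theorem pv_find_none (l : List Char) (c : Char) : PySem.Chars.find l [c] = -1 ↔ c ∉ l := by
  rw [PySem.Chars.find_eq_neg_one_iff, List.singleton_infix_iff]

theorem pv_find_found (l : List Char) (c : Char) (h : PySem.Chars.find l [c] ≠ -1) :
    0 ≤ PySem.Chars.find l [c] ∧ l[(PySem.Chars.find l [c]).toNat]? = some c ∧
      ∀ i < (PySem.Chars.find l [c]).toNat, l[i]? ≠ some c := by
  have h0 : 0 ≤ PySem.Chars.find l [c] :=
    (PySem.Chars.find_nonneg_iff l [c]).mpr ((PySem.Chars.find_ne_neg_one_iff l [c]).mp h)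
  have hs := PySem.Chars.find_spec (s := l) (sub := [c]) h0
  refine ⟨h0, (pv_charAt c l _).mp hs.1, fun i hi hc => hs.2 i hi ((pv_charAt c l i).mpr hc)⟩

theorem pv_innerA_eq (l : List Char) :
    pvInnerA l = (l.takeWhile (fun c => !(c == ' ')), l.dropWhile (fun c => !(c == ' '))) := by
  induction l with
  | nil => simp [pvInnerA]
  | cons c cs ih =>
    by_cases h : c = ' ' <;>
      simp [pvInnerA, h, List.takeWhile_cons, List.dropWhile_cons, ih]

theorem pv_loopA_skip (p : List Char) (l : List Char) (s : List Char) (r : List String)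
    (hp : ∀ x ∈ p, ¬(x = '#' ∨ x = '@')) :
    pvLoopA (p ++ l) s r = pvLoopA l (s ++ p) r := by
  induction p generalizing s with
  | nil => simp
  | cons x pl ih =>
    have hx : ¬(x = '#' ∨ x = '@') := hp x (by simp)
    rw [List.cons_append, pvLoopA]
    simp only [hx, dite_false, reduceDIte]
    rw [ih (s ++ [x]) (fun y hy => hp y (List.mem_cons_of_mem _ hy))]
    simp

theorem pv_tw (l : List Char) (n : Nat) (h1 : l[n]? = some ' ')
    (h2 : ∀ i < n, l[i]? ≠ some ' ') :
    l.takeWhile (fun c => !(c == ' ')) = l.take n ∧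
      l.dropWhile (fun c => !(c == ' ')) = l.drop n := by
  induction l generalizing n with
  | nil => simp at h1
  | cons x t ih =>
    cases n with
    | zero =>
      simp only [List.getElem?_cons_zero, Option.some_inj] at h1
      simp [List.takeWhile_cons, List.dropWhile_cons, h1]
    | succ m =>
      have hx : x ≠ ' ' := by
        have := h2 0 (Nat.succ_pos m)
        simpa using this
      have ht := ih m (by simpa using h1)
        (fun i hi => by have := h2 (i + 1) (by omega); simpa using this)
      simp [List.takeWhile_cons, List.dropWhile_cons, hx, ht.1, ht.2]

-- first marker index: what B's 'j = min of the two finds' satisfies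
theorem pv_jspec (l : List Char)
    (hna : ¬(PySem.Chars.find l ['#'] = -1 ∧ PySem.Chars.find l ['@'] = -1)) :
    0 ≤ (if PySem.Chars.find l ['#'] = -1 then PySem.Chars.find l ['@']
         else if PySem.Chars.find l ['@'] = -1 then PySem.Chars.find l ['#']
         else min (PySem.Chars.find l ['#']) (PySem.Chars.find l ['@'])) ∧
    (l[(if PySem.Chars.find l ['#'] = -1 then PySem.Chars.find l ['@']
         else if PySem.Chars.find l ['@'] = -1 then PySem.Chars.find l ['#']
         else min (PySem.Chars.find l ['#']) (PySem.Chars.find l ['@'])).toNat]? = some '#' ∨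
      l[(if PySem.Chars.find l ['#'] = -1 then PySem.Chars.find l ['@']
         else if PySem.Chars.find l ['@'] = -1 then PySem.Chars.find l ['#']
         else min (PySem.Chars.find l ['#']) (PySem.Chars.find l ['@'])).toNat]? = some '@') ∧
    ∀ i < (if PySem.Chars.find l ['#'] = -1 then PySem.Chars.find l ['@']
         else if PySem.Chars.find l ['@'] = -1 then PySem.Chars.find l ['#']
         else min (PySem.Chars.find l ['#']) (PySem.Chars.find l ['@'])).toNat,
      l[i]? ≠ some '#' ∧ l[i]? ≠ some '@' := by
  rw [not_and_or] at hna
  split_ifs with hh ha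
  · -- no '#', so '@' was found
    have ha : PySem.Chars.find l ['@'] ≠ -1 := by tauto
    obtain ⟨h0, hat, hmin⟩ := pv_find_found l '@' ha
    have hnh := (pv_find_none l '#').mp hh
    refine ⟨h0, Or.inr hat, fun i hi => ⟨fun hc => hnh ?_, hmin i hi⟩⟩
    exact List.mem_of_getElem? hc
  · -- '#' found, no '@'
    obtain ⟨h0, hat, hmin⟩ := pv_find_found l '#' hh
    have hna' := (pv_find_none l '@').mp ha
    refine ⟨h0, Or.inl hat, fun i hi => ⟨hmin i hi, fun hc => hna' ?_⟩⟩
    exact List.mem_of_getElem? hc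
  · -- both found
    obtain ⟨h0, hat, hmin⟩ := pv_find_found l '#' hh
    obtain ⟨a0, aat, amin⟩ := pv_find_found l '@' ha
    rcases le_total (PySem.Chars.find l ['#']) (PySem.Chars.find l ['@']) with hle | hle
    · rw [min_eq_left hle]
      exact ⟨h0, Or.inl hat, fun i hi => ⟨hmin i hi, amin i (by omega)⟩⟩
    · rw [min_eq_right hle]
      exact ⟨a0, Or.inr aat, fun i hi => ⟨hmin i (by omega), amin i hi⟩⟩

theorem pv_take_markerfree (l : List Char) (n : Nat)
    (h : ∀ i < n, l[i]? ≠ some '#' ∧ l[i]? ≠ some '@') :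
    ∀ x ∈ l.take n, ¬(x = '#' ∨ x = '@') := by
  intro x hx hc
  obtain ⟨i, hi, hget⟩ := List.getElem_of_mem hx
  have hlen : i < n ∧ i < l.length := by simp [List.length_take] at hi; omega
  have hget' : l[i]? = some x := by
    rw [List.getElem?_eq_getElem hlen.2, ← hget, List.getElem_take]
  rcases hc with hc | hc
  · exact (h i hlen.1).1 (hc ▸ hget')
  · exact (h i hlen.1).2 (hc ▸ hget')

theorem pv_main : ∀ (n : Nat) (l : List Char) (r : List String), l.length ≤ n →
    pvLoopA l [] r = pvLoopB l r := by
  intro n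
  induction n with
  | zero =>
    intro l r hl
    have : l = [] := List.eq_nil_of_length_eq_zero (by omega)
    subst this
    rw [pvLoopA, pvLoopB]
    simp
  | succ n ih =>
    intro l r hl
    rcases eq_or_ne l [] with hnil | hne
    · subst hnil; rw [pvLoopA, pvLoopB]; simp
    rw [pvLoopB]
    simp only [hne, if_neg hne]
    by_cases hna : PySem.Chars.find l ['#'] = -1 ∧ PySem.Chars.find l ['@'] = -1
    · -- no markers anywhere: A accumulates the whole string
      simp only [hna, if_pos hna, and_self]
      have hp : ∀ x ∈ l, ¬(x = '#' ∨ x = '@') := by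
        intro x hx hc
        rcases hc with hc | hc <;> subst hc
        · exact (pv_find_none l '#').mp hna.1 hx
        · exact (pv_find_none l '@').mp hna.2 hx
      have := pv_loopA_skip l [] [] r hp
      simp only [List.append_nil, List.nil_append] at this
      rw [this, pvLoopA]
      simp [hne]
    · simp only [if_neg hna]
      obtain ⟨hj0, hjat, hjmin⟩ := pv_jspec l hna
      set j : Int := (if PySem.Chars.find l ['#'] = -1 then PySem.Chars.find l ['@']
         else if PySem.Chars.find l ['@'] = -1 then PySem.Chars.find l ['#']
         else min (PySem.Chars.find l ['#']) (PySem.Chars.find l ['@'])) with hjdef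
      have hjlt : j.toNat < l.length := by
        rcases hjat with h | h <;> exact (List.getElem?_eq_some_iff.mp h).1
      -- split l at the marker
      have hsplit : l = l.take j.toNat ++ l.drop j.toNat := (List.take_append_drop _ l).symm
      have hmarkfree := pv_take_markerfree l j.toNat hjmin
      have hA1 : pvLoopA l [] r = pvLoopA (l.drop j.toNat) (l.take j.toNat) r := by
        conv_lhs => rw [hsplit]
        have := pv_loopA_skip (l.take j.toNat) (l.drop j.toNat) [] r hmarkfree
        simpa using this
      have hdropcons : l.drop j.toNat = l[j.toNat] :: l.drop (j.toNat + 1) :=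
        List.drop_eq_getElem_cons hjlt
      have hcm : l[j.toNat] = '#' ∨ l[j.toNat] = '@' := by
        rcases hjat with h | h <;> [left; right] <;>
          simpa [List.getElem?_eq_getElem hjlt] using h
      -- result1 agreement
      have hslice_p : PySem.Chars.slice l none (some j) = l.take j.toNat := by
        simp only [PySem.Chars.slice_eq_listSlice]
        exact PySem.List.slice_to l hj0
      have hr1 : (if 0 < j then r ++ [String.ofList (PySem.Chars.slice l none (some j))] else r)
          = (if l.take j.toNat = [] then r else r ++ [String.ofList (l.take j.toNat)]) := by
        rw [hslice_p]
        by_cases hp0 : 0 < j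
        · have : l.take j.toNat ≠ [] := by
            have : j.toNat ≠ 0 := by omega
            simp [List.take_eq_nil_iff, this, hne]
          simp [hp0, this]
        · have : j.toNat = 0 := by omega
          simp [hp0, this]
      -- the A-side marker step
      have hA2 : pvLoopA (l.drop j.toNat) (l.take j.toNat) r =
          pvLoopA (pvInnerA (l.drop j.toNat)).2.tail []
            ((if l.take j.toNat = [] then r else r ++ [String.ofList (l.take j.toNat)]) ++
              [String.ofList (pvInnerA (l.drop j.toNat)).1]) := by
        conv_lhs => rw [hdropcons, pvLoopA]
        simp only [hcm, dite_true, reduceDIte, dif_pos]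
        rw [← hdropcons]
      -- findFrom characterisation
      have hft := PySem.Chars.findFrom_natCast l [' '] j.toNat (by omega)
      rw [Int.toNat_of_nonneg hj0] at hft
      rw [hA1, hA2, hft, hr1]
      by_cases hsf : PySem.Chars.find (l.drop j.toNat) [' '] = -1
      · -- no space after the marker: token runs to the end
        simp only [hsf, if_pos rfl, reduceIte]
        have hnosp : ∀ x ∈ l.drop j.toNat, (fun c => !(c == ' ')) x = true := by
          intro x hx
          have := (pv_find_none (l.drop j.toNat) ' ').mp hsf
          simp only [Bool.not_eq_true', beq_eq_false_iff_ne]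
          intro hc; exact this (hc ▸ hx)
        have hinner := pv_innerA_eq (l.drop j.toNat)
        rw [List.takeWhile_eq_self_iff.mpr hnosp, List.dropWhile_eq_nil_iff.mpr hnosp] at hinner
        rw [hinner]
        simp only [List.tail_nil]
        rw [pvLoopA]
        simp only [if_pos rfl, reduceIte]
        have hslice_t : PySem.Chars.slice l (some j) none = l.drop j.toNat := by
          simp only [PySem.Chars.slice_eq_listSlice]
          exact PySem.List.slice_from l hj0
        rw [hslice_t]
      · -- first space at index s in the suffix
        obtain ⟨hs0, hsat, hsmin⟩ := pv_find_found (l.drop j.toNat) ' ' hsf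
        set s : Int := PySem.Chars.find (l.drop j.toNat) [' '] with hsdef
        have hks : ¬(j + s = -1) := by omega
        simp only [hsf, if_neg hsf, reduceIte, if_neg hks]
        have hinner := pv_innerA_eq (l.drop j.toNat)
        obtain ⟨htw, hdw⟩ := pv_tw (l.drop j.toNat) s.toNat hsat hsmin
        rw [htw, hdw] at hinner
        rw [hinner]
        have hslice_tok : PySem.Chars.slice l (some j) (some (j + s)) =
            (l.drop j.toNat).take s.toNat := by
          simp only [PySem.Chars.slice_eq_listSlice]
          rw [PySem.List.slice_toNat l hj0 (by omega)]
          congr 1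
          omega
        have hslice_rest : PySem.Chars.slice l (some (j + s + 1)) none =
            l.drop (j.toNat + s.toNat + 1) := by
          simp only [PySem.Chars.slice_eq_listSlice]
          rw [PySem.List.slice_from l (by omega)]
          congr 1
          omega
        have htail : ((l.drop j.toNat).drop s.toNat).tail = l.drop (j.toNat + s.toNat + 1) := by
          rw [List.drop_drop, List.tail_drop]
        rw [hslice_tok, hslice_rest, htail]
        -- recurse
        have hslt : l.length > 0 := List.length_pos_iff.mpr hne
        exact ih (l.drop (j.toNat + s.toNat + 1))
          ((if l.take j.toNat = [] then r else r ++ [String.ofList (l.take j.toNat)]) ++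
            [String.ofList ((l.drop j.toNat).take s.toNat)])
          (by simp only [List.length_drop]; omega)

-- ===== VERDICT (by name: the statement is the Claim_ definition above) =====
theorem split_text_m_h_t_spec : Claim_equal_split_text_m_h_t := by
  intro text _
  unfold Spec_split_text_m_h_t split_text_m_h_t split_text_m_h_t_alt
  exact pv_main text.toList.length text.toList [] le_rfl
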